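-- pv_equiv track=rewrite | github.com/brawlingthebits/cederj-programming-fundamentals | AP1s/2021-1/katas dos tutores/AP1XQ3.py | generate_all
-- ===== SOURCE A (Python) =====
-- def generate_all(letras_distintas, tam_atual, palavras_anteriores, acumulado):
--     current_words = []
--     if tam_atual == len(letras_distintas):
--         return acumulado
--     for word in palavras_anteriores:
--         for letter in letras_distintas:
--             current_words.append(word + letter)
--
--     acumulado.extend(current_words)
--     return generate_all(letras_distintas, tam_atual + 1, current_words, acumulado)
-- ===== SOURCE B (Python) =====
-- def generate_all(letras_distintas, tam_atual, palavras_anteriores, acumulado):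
--     current = palavras_anteriores
--     while tam_atual != len(letras_distintas):
--         current = [word + letter for word in current for letter in letras_distintas]
--         acumulado.extend(current)
--         tam_atual += 1
--     return acumulado
-- ===== Notes on version B (the rewrite author's own statement) =====
-- stated objective: simpler
-- what changed: Replaces A's tail recursion (fresh call frame and list per level) with a single iterative while-loop that rebuilds 'current' via one comprehension and extends the same accumulator in place.
import Mathlib
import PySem

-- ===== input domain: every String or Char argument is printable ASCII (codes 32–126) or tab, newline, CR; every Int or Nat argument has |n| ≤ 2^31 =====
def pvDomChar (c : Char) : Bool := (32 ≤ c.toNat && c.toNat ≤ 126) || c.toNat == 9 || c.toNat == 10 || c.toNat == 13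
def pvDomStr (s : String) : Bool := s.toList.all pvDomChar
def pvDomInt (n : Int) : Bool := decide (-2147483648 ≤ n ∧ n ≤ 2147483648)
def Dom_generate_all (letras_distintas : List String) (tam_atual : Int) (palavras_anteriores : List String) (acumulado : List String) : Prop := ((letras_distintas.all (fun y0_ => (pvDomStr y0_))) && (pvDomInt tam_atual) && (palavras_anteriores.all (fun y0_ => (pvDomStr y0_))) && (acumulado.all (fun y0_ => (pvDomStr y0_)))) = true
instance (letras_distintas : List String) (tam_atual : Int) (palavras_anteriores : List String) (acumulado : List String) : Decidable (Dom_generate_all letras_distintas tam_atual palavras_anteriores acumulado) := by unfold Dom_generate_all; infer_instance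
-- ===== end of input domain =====

-- B replaces A's tail recursion with an iterative loop (one comprehension per round, extend in place); same return value and same mutation of acumulado.


-- ===== PORT A =====
-- Literal port of the recursion; the 'length < tam' guard only makes the definition
-- total where the Python recurses forever (outside Pre_).
def generate_all (letras_distintas : List String) (tam_atual : Int) (palavras_anteriores : List String) (acumulado : List String) : List String :=
  if tam_atual = (letras_distintas.length : Int) then acumulado
  else if (letras_distintas.length : Int) < tam_atual then acumulado  -- totality guard (Python diverges here)
  else
    let current_words : List String :=
      palavras_anteriores.foldl (fun cw word =>
        letras_distintas.foldl (fun cw letter => cw ++ [word ++ letter]) cw) []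
    generate_all letras_distintas (tam_atual + 1) current_words (acumulado ++ current_words)
termination_by ((letras_distintas.length : Int) - tam_atual).toNat
decreasing_by omega

-- ===== PORT B =====
-- The while-loop of Source B: state (current, acumulado, tam_atual); same totality guard.
def generate_all_alt_loop (letras_distintas : List String) (current acumulado : List String) (tam_atual : Int) : List String :=
  if tam_atual ≠ (letras_distintas.length : Int) then
    if (letras_distintas.length : Int) < tam_atual then acumulado  -- totality guard (Python loops forever here)
    else
      let current' := current.flatMap (fun word => letras_distintas.map (fun letter => word ++ letter))
      generate_all_alt_loop letras_distintas current' (acumulado ++ current') (tam_atual + 1)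
  else acumulado
termination_by ((letras_distintas.length : Int) - tam_atual).toNat
decreasing_by omega

def generate_all_alt (letras_distintas : List String) (tam_atual : Int) (palavras_anteriores : List String) (acumulado : List String) : List String :=
  generate_all_alt_loop letras_distintas palavras_anteriores acumulado tam_atual

-- ===== PRECONDITION & SPEC =====
-- Pre_ excludes tam_atual > len(letras_distintas), on which the Python A never returns
-- (unbounded recursion, RecursionError); B loops forever there too.
def Pre_generate_all (letras_distintas : List String) (tam_atual : Int) (palavras_anteriores : List String) (acumulado : List String) : Prop :=
  tam_atual ≤ (letras_distintas.length : Int)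
instance (letras_distintas : List String) (tam_atual : Int) (palavras_anteriores : List String) (acumulado : List String) : Decidable (Pre_generate_all letras_distintas tam_atual palavras_anteriores acumulado) := by unfold Pre_generate_all; infer_instance

def pvWitness_generate_all : List String × Int × List String × List String := (["a", "b"], 1, ["a", "b"], ["a", "b"])

def Spec_generate_all (letras_distintas : List String) (tam_atual : Int) (palavras_anteriores : List String) (acumulado : List String) (out : List String) : Prop := out = generate_all_alt letras_distintas tam_atual palavras_anteriores acumulado
instance (letras_distintas : List String) (tam_atual : Int) (palavras_anteriores : List String) (acumulado : List String) (out : List String) : Decidable (Spec_generate_all letras_distintas tam_atual palavras_anteriores acumulado out) := by unfold Spec_generate_all; infer_instance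

-- ===== CLAIM (what is proved, stated in full; the proofs are below) =====
def Claim_equal_generate_all : Prop := ∀ (letras_distintas : List String) (tam_atual : Int) (palavras_anteriores : List String) (acumulado : List String), Dom_generate_all letras_distintas tam_atual palavras_anteriores acumulado → Pre_generate_all letras_distintas tam_atual palavras_anteriores acumulado → Spec_generate_all letras_distintas tam_atual palavras_anteriores acumulado (generate_all letras_distintas tam_atual palavras_anteriores acumulado)

-- ===== LEMMAS AND PROOFS =====

-- A's nested append-loops build exactly B's comprehension.
theorem current_words_eq (letras : List String) (prev : List String) :
    prev.foldl (fun cw word => letras.foldl (fun cw letter => cw ++ [word ++ letter]) cw) [] =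
    prev.flatMap (fun word => letras.map (fun letter => word ++ letter)) := by
  have h1 : prev.foldl (fun cw word => letras.foldl (fun cw letter => cw ++ [word ++ letter]) cw) [] =
      prev.foldl (fun cw word => cw ++ letras.map (fun letter => word ++ letter)) [] := by
    apply List.foldl_ext
    intro cw word hw
    exact PySem.List.foldl_append_singleton_eq_map ..
  rw [h1, PySem.List.foldl_append_eq_flatMap]
  simp

theorem gen_eq (n : Nat) : ∀ (letras : List String) (tam : Int) (prev acum : List String),
    ((letras.length : Int) - tam).toNat ≤ n →
    generate_all letras tam prev acum = generate_all_alt_loop letras prev acum tam := by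
  induction n with
  | zero =>
    intro letras tam prev acum hn
    unfold generate_all generate_all_alt_loop
    by_cases he : tam = (letras.length : Int)
    · simp [he]
    · have hlt : (letras.length : Int) < tam := by omega
      simp [he, hlt]
  | succ n ih =>
    intro letras tam prev acum hn
    unfold generate_all generate_all_alt_loop
    by_cases he : tam = (letras.length : Int)
    · simp [he]
    · by_cases hlt : (letras.length : Int) < tam
      · simp [he, hlt]
      · simp only [he, hlt, if_false, ne_eq, not_false_eq_true, if_true]
        rw [current_words_eq]
        exact ih letras (tam + 1) _ _ (by omega)

-- ===== VERDICT (by name: the statement is the Claim_ definition above) =====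
theorem generate_all_spec : Claim_equal_generate_all := by
  intro letras tam prev acum _ _
  unfold Spec_generate_all generate_all_alt
  exact gen_eq ((letras.length : Int) - tam).toNat letras tam prev acum le_rfl
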